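-- pv_equiv track=rewrite | github.com/gopyc-code/python-samples | tricks.py | unique_even
-- ===== SOURCE A (Python) =====
-- from typing import Sequence
-- from typing import NamedTuple, Sequence
--
-- def unique_even(array: Sequence[int]) -> list[int]:
-- 	return [
-- 		array[i] for i in range(len(array))
-- 		if not array[i] % 2 and
-- 		((i + 1 < len(array) and
-- 		array[i] not in array[i + 1:]) or
-- 		(i + 1 == len(array)))
-- 	]
-- ===== SOURCE B (Python) =====
-- def unique_even(array):
--     seen = set()
--     out = []
--     for x in reversed(array):
--         if x not in seen:
--             if x % 2 == 0:
--                 out.append(x)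
--             seen.add(x)
--     out.reverse()
--     return out
-- ===== Notes on version B (the rewrite author's own statement) =====
-- stated objective: faster
-- what changed: Replaces the quadratic index comprehension (each element re-scanned for membership in its tail slice) with a single backward pass over the list maintaining a hash set of values already seen, then a reversal.
import Mathlib
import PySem

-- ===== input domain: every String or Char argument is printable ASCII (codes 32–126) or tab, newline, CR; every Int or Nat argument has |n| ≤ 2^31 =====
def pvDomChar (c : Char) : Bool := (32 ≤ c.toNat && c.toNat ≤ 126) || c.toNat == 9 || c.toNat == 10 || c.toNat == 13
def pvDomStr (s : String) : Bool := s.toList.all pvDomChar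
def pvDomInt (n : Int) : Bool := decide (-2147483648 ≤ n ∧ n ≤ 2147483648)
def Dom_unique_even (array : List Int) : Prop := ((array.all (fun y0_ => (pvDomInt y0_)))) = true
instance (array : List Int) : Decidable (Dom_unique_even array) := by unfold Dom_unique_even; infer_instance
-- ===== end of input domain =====

-- B replaces A's quadratic index/tail-slice comprehension by one linear backward pass with a seen-set, then a reversal (objective: faster).

-- ===== PORT A =====
-- [array[i] for i in range(len(array)) if not array[i] % 2 and ((i+1 < len(array) and array[i] not in array[i+1:]) or (i+1 == len(array)))]
def unique_even (array : List Int) : List Int :=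
  ((PySem.List.pyRange 0 (array.length : Int) 1).filter (fun i =>
      decide (PySem.Int.mod (PySem.List.pyGetD array i 0) 2 = 0) &&
      ((decide (i + 1 < (array.length : Int)) &&
        !(decide (PySem.List.pyGetD array i 0 ∈ PySem.List.slice array (some (i + 1)) none)))
       || decide (i + 1 = (array.length : Int))))).map
    (fun i => PySem.List.pyGetD array i 0)

-- ===== PORT B =====
-- for x in reversed(array): if x not in seen: (if x % 2 == 0: out.append(x)); seen.add(x); then out.reverse()
def unique_even_alt (array : List Int) : List Int :=
  ((array.reverse.foldl
    (fun (st : PySem.Set Int × List Int) x =>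
      if x ∈ st.1 then st
      else (PySem.Set.add st.1 x,
            if PySem.Int.mod x 2 = 0 then st.2 ++ [x] else st.2))
    ((PySem.Set.empty : PySem.Set Int), ([] : List Int))).2).reverse

-- ===== PRECONDITION & SPEC =====
def Spec_unique_even (array : List Int) (out : List Int) : Prop := out = unique_even_alt array
instance (array : List Int) (out : List Int) : Decidable (Spec_unique_even array out) := by unfold Spec_unique_even; infer_instance

-- ===== CLAIM (what is proved, stated in full; the proofs are below) =====
def Claim_equal_unique_even : Prop := ∀ (array : List Int), Dom_unique_even array → Spec_unique_even array (unique_even array)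

-- ===== LEMMAS AND PROOFS =====

-- reference: keep the even elements that are last occurrences and not in `seen`
def pvKeep : List Int → List Int → List Int
  | [], _ => []
  | x :: xs, seen =>
      (if x ∈ xs ∨ x ∈ seen then [] else if PySem.Int.mod x 2 = 0 then [x] else []) ++ pvKeep xs seen

-- A's filter condition, read at a natural index
def pvCondA (l : List Int) (k : Nat) : Bool :=
  decide (PySem.Int.mod (l.getD k 0) 2 = 0) &&
  ((decide (k + 1 < l.length) && !(decide (l.getD k 0 ∈ l.drop (k + 1))))
   || decide (k + 1 = l.length))

lemma pvCondA_bridge (l : List Int) (k : Nat) :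
    (decide (PySem.Int.mod (PySem.List.pyGetD l ((k : Int)) 0) 2 = 0) &&
      ((decide ((k : Int) + 1 < (l.length : Int)) &&
        !(decide (PySem.List.pyGetD l ((k : Int)) 0 ∈ PySem.List.slice l (some ((k : Int) + 1)) none)))
       || decide ((k : Int) + 1 = (l.length : Int)))) = pvCondA l k := by
  have h1 : ((k : Int) + 1) = ((k + 1 : Nat) : Int) := by push_cast; ring
  rw [h1, PySem.List.slice_from_natCast]
  simp only [pvCondA, PySem.List.pyGetD_natCast, Nat.cast_lt, Nat.cast_inj]

lemma pvCondA_succ (x : Int) (xs : List Int) (k : Nat) :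
    pvCondA (x :: xs) (k + 1) = pvCondA xs k := by
  simp [pvCondA]

lemma pvCondA_zero (x : Int) (xs : List Int) :
    pvCondA (x :: xs) 0 = (decide (PySem.Int.mod x 2 = 0) && !(decide (x ∈ xs))) := by
  simp only [pvCondA, List.getD_cons_zero, List.length_cons, List.drop_succ_cons,
    List.drop_zero, Nat.zero_add]
  cases xs with
  | nil => simp
  | cons a as => simp

lemma pvA_eq_keep (l : List Int) :
    ((List.range l.length).filter (pvCondA l)).map (fun k => l.getD k 0) = pvKeep l [] := by
  induction l with
  | nil => simp [pvKeep]
  | cons x xs ih =>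
    have hk0 : pvKeep (x :: xs) [] =
        (if x ∈ xs ∨ x ∈ ([] : List Int) then []
         else if PySem.Int.mod x 2 = 0 then [x] else []) ++ pvKeep xs [] := rfl
    have hrange : List.range (xs.length + 1) = 0 :: (List.range xs.length).map Nat.succ :=
      List.range_succ_eq_map
    have htail :
        (((List.range xs.length).map Nat.succ).filter (pvCondA (x :: xs))).map
            (fun k => (x :: xs).getD k 0)
          = pvKeep xs [] := by
      rw [List.filter_map, List.map_map]
      have hfun : (pvCondA (x :: xs)) ∘ Nat.succ = pvCondA xs := by
        funext k
        exact pvCondA_succ x xs k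
      rw [hfun, ← ih]
      rfl
    show (((List.range (xs.length + 1)).filter (pvCondA (x :: xs))).map
        (fun k => (x :: xs).getD k 0)) = pvKeep (x :: xs) []
    rw [hrange, List.filter_cons, pvCondA_zero, hk0]
    by_cases hm : x ∈ xs
    · simp only [hm, decide_true, Bool.not_true, Bool.and_false, Bool.false_eq_true, if_false,
        true_or, if_true]
      rw [htail]
      simp
    · by_cases he : PySem.Int.mod x 2 = 0
      · simp only [hm, he, decide_true, decide_false, Bool.not_false, Bool.and_true, if_true,
          List.mem_nil_iff, or_false, if_false]
        rw [List.map_cons, htail]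
        simp [hm, he]
      · simp only [hm, decide_false, Bool.not_false, Bool.and_true]
        rw [if_neg (by simpa using he)]
        rw [htail]
        rw [if_neg (show ¬(False ∨ x ∈ ([] : List Int)) by simp), if_neg he, List.nil_append]

lemma pvB_invariant (l : List Int) :
    ∀ (seen : PySem.Set Int) (out : List Int),
      (l.reverse.foldl
        (fun (st : PySem.Set Int × List Int) x =>
          if x ∈ st.1 then st
          else (PySem.Set.add st.1 x,
                if PySem.Int.mod x 2 = 0 then st.2 ++ [x] else st.2))
        (seen, out)).2 = out ++ (pvKeep l seen).reverse ∧
      ∀ y, y ∈ (l.reverse.foldl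
        (fun (st : PySem.Set Int × List Int) x =>
          if x ∈ st.1 then st
          else (PySem.Set.add st.1 x,
                if PySem.Int.mod x 2 = 0 then st.2 ++ [x] else st.2))
        (seen, out)).1 ↔ y ∈ l ∨ y ∈ seen := by
  induction l with
  | nil => intro seen out; simp [pvKeep]
  | cons x xs ih =>
    intro seen out
    have hrev : (x :: xs).reverse = xs.reverse ++ [x] := by simp
    rw [hrev, List.foldl_append]
    obtain ⟨h2, h1⟩ := ih seen out
    set st1 := (xs.reverse.foldl
        (fun (st : PySem.Set Int × List Int) x =>
          if x ∈ st.1 then st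
          else (PySem.Set.add st.1 x,
                if PySem.Int.mod x 2 = 0 then st.2 ++ [x] else st.2))
        (seen, out)) with hst1
    have hkeep : pvKeep (x :: xs) seen =
        (if x ∈ xs ∨ x ∈ seen then []
         else if PySem.Int.mod x 2 = 0 then [x] else []) ++ pvKeep xs seen := rfl
    simp only [List.foldl_cons, List.foldl_nil]
    by_cases hmem : x ∈ st1.1
    · have hx : x ∈ xs ∨ x ∈ seen := (h1 x).mp hmem
      rw [if_pos hmem]
      constructor
      · rw [h2, hkeep, if_pos hx]
        simp
      · intro y
        rw [h1 y]
        constructor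
        · intro h; rcases h with h | h
          · exact Or.inl (List.mem_cons_of_mem x h)
          · exact Or.inr h
        · intro h; rcases h with h | h
          · rcases List.mem_cons.mp h with h | h
            · subst h; exact hx
            · exact Or.inl h
          · exact Or.inr h
    · have hx : ¬ (x ∈ xs ∨ x ∈ seen) := fun h => hmem ((h1 x).mpr h)
      rw [if_neg hmem]
      constructor
      · show (if PySem.Int.mod x 2 = 0 then st1.2 ++ [x] else st1.2)
            = out ++ (pvKeep (x :: xs) seen).reverse
        rw [hkeep, if_neg hx, h2]
        by_cases he : PySem.Int.mod x 2 = 0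
        · rw [if_pos he, if_pos he]
          simp
        · rw [if_neg he, if_neg he]
          simp
      · intro y
        show y ∈ PySem.Set.add st1.1 x ↔ _
        rw [PySem.Set.mem_add, h1 y, List.mem_cons]
        tauto

lemma pvA_char (l : List Int) : unique_even l = pvKeep l [] := by
  rw [← pvA_eq_keep]
  unfold unique_even
  rw [PySem.List.pyRange_one]
  simp only [zero_add, Int.sub_zero, Int.toNat_natCast]
  rw [List.filter_map, List.map_map]
  have hfun : ∀ (p q : Nat → Bool) (f g : Nat → Int), p = q → f = g →
      ((List.range l.length).filter p).map f = ((List.range l.length).filter q).map g := by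
    intro p q f g hp hf; rw [hp, hf]
  apply hfun
  · funext k
    exact pvCondA_bridge l k
  · funext k
    simp [Function.comp, PySem.List.pyGetD_natCast]

lemma pvB_char (l : List Int) : unique_even_alt l = pvKeep l [] := by
  unfold unique_even_alt
  obtain ⟨h2, -⟩ := pvB_invariant l (PySem.Set.empty : PySem.Set Int) []
  have hempty : (PySem.Set.empty : PySem.Set Int) = ([] : List Int) := rfl
  rw [hempty] at h2 ⊢
  rw [h2]
  simp

-- ===== VERDICT (by name: the statement is the Claim_ definition above) =====
theorem unique_even_spec : Claim_equal_unique_even := by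
  intro array _
  unfold Spec_unique_even
  rw [pvA_char, pvB_char]
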